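-- pv_equiv track=rewrite | github.com/pickleshy/intellivision | games/downbeat-v2/assets/extract_melody.py | extract_melody
-- ===== SOURCE A (Python) =====
-- def extract_melody(ppqn, events, grid_size=128, method='highest'):
--     """
--     Extract melody from MIDI events using the specified method.
--
--     Methods:
--       'highest' — highest note per tick (works when melody is on top)
--       'newest'  — most recently attacked note per tick (works when melody
--                    moves while chord tones sustain)
--
--     Returns list of grid_size MIDI note numbers (0 = rest).
--     """
--     ticks_per_16th = ppqn // 4  # At 256 ppqn, this is 64
--
--     # Sort events: at same tick, process note-offs before note-ons
--     # This ensures a note that ends and a new one starts at the same tick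
--     # are handled correctly
--     sorted_events = sorted(events, key=lambda e: (e[1], 0 if e[0] == 'off' else 1))
--
--     # Detect notes sustaining from before tick 0:
--     # Any note-off that occurs before any note-on for that pitch
--     # means the note was already active at tick 0
--     first_on_tick = {}
--     first_off_tick = {}
--     for e in sorted_events:
--         note = e[2]
--         if e[0] == 'on' and note not in first_on_tick:
--             first_on_tick[note] = e[1]
--         elif e[0] == 'off' and note not in first_off_tick:
--             first_off_tick[note] = e[1]
--
--     # Notes where first event is off (no preceding on in this file)
--     # were sustaining from the previous section
--     pre_existing = set()
--     for note, off_tick in first_off_tick.items():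
--         if note not in first_on_tick or first_on_tick[note] > off_tick:
--             pre_existing.add(note)
--
--     # Initialize active notes with pre-existing ones
--     active_notes = set(pre_existing)
--
--     # Walk through grid positions
--     results = [0] * grid_size
--     event_idx = 0
--     prev_tick = -1
--     last_melody = 0  # for 'newest' method: sustain previous melody
--
--     for grid_pos in range(grid_size):
--         tick = grid_pos * ticks_per_16th
--
--         # Track which notes had onsets since last grid position
--         new_onsets = set()
--
--         # Process all events up to and including this tick
--         while event_idx < len(sorted_events) and sorted_events[event_idx][1] <= tick:
--             e = sorted_events[event_idx]
--             if e[0] == 'on':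
--                 active_notes.add(e[2])
--                 if e[1] > prev_tick:  # onset since last grid tick
--                     new_onsets.add(e[2])
--             elif e[0] == 'off':
--                 active_notes.discard(e[2])
--                 new_onsets.discard(e[2])
--             event_idx += 1
--
--         if method == 'newest':
--             if new_onsets:
--                 # Pick highest of the newly attacked notes
--                 last_melody = max(new_onsets)
--                 results[grid_pos] = last_melody
--             elif last_melody in active_notes:
--                 # Sustain previous melody note if still sounding
--                 results[grid_pos] = last_melody
--             elif active_notes:
--                 # Melody note ended, fall back to highest active
--                 last_melody = max(active_notes)
--                 results[grid_pos] = last_melody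
--             # else: rest (0)
--         else:  # 'highest'
--             if active_notes:
--                 results[grid_pos] = max(active_notes)
--
--         prev_tick = tick
--
--     return results
-- ===== SOURCE B (Python) =====
-- def extract_melody(ppqn, events, grid_size=128, method='highest'):
--     """Two-pass re-implementation: pass 1 tabulates (active-note snapshot,
--     new onsets) per grid position; pass 2 applies the selection method."""
--     ticks_per_16th = ppqn // 4
--     sorted_events = sorted(events, key=lambda e: (e[1], 0 if e[0] == 'off' else 1))
--
--     # A note sustains from before tick 0 iff it has an 'off' event with no
--     # 'on' event at or before that tick.
--     active = set()
--     for kind, tick, note in events: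
--         if kind == 'off' and not any(
--                 k == 'on' and n == note and t <= tick for k, t, n in events):
--             active.add(note)
--
--     # Pass 1: per grid position, snapshot the active set and the new onsets.
--     table = []
--     i = 0
--     prev_tick = -1
--     for grid_pos in range(grid_size):
--         tick = grid_pos * ticks_per_16th
--         new_onsets = set()
--         while i < len(sorted_events) and sorted_events[i][1] <= tick:
--             kind, etick, note = sorted_events[i]
--             if kind == 'on':
--                 active.add(note)
--                 if etick > prev_tick:
--                     new_onsets.add(note)
--             elif kind == 'off':
--                 active.discard(note)
--                 new_onsets.discard(note)
--             i += 1
--         table.append((set(active), new_onsets))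
--         prev_tick = tick
--
--     # Pass 2: apply the selection method to the table.
--     results = []
--     last_melody = 0
--     for act, onsets in table:
--         if method == 'newest':
--             if onsets:
--                 last_melody = max(onsets)
--                 results.append(last_melody)
--             elif last_melody in act:
--                 results.append(last_melody)
--             elif act:
--                 last_melody = max(act)
--                 results.append(last_melody)
--             else:
--                 results.append(0)
--         else:
--             results.append(max(act) if act else 0)
--     return results
-- ===== Notes on version B (the rewrite author's own statement) =====
-- stated objective: alternative
-- what changed: Single fused grid loop split into two passes (a precomputed per-position table of active-set snapshots and new onsets, then a selection pass), and the pre-existing-note detection replaced: one existential scan per 'off' event over the raw event list instead of building two first-tick dicts from the sorted list.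
import Mathlib
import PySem

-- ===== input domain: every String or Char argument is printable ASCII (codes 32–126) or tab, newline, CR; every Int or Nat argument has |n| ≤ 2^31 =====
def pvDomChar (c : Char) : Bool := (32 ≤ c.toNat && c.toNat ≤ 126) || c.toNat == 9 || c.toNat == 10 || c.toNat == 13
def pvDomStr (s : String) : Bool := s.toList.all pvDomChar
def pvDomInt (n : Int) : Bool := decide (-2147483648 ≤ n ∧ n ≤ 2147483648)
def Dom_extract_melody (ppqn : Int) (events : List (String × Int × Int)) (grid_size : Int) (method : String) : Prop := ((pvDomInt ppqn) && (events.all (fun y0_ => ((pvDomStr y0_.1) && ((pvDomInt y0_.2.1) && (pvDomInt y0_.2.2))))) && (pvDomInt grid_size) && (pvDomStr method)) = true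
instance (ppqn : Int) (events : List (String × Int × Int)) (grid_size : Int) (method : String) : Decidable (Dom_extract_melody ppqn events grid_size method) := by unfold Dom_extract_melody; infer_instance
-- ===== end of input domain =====

-- B re-implements A as two passes (a per-grid-position table of active/onset snapshots, then a
-- selection pass) with a different pre-existing-note scan; equivalence of return values is proved.

-- ===== PORT A =====
-- the inner `while event_idx < len(sorted_events) and ...` event-consumption loop, written
-- identically in A and in B's pass 1 (shared here); the fuel argument (always called with
-- `se.length - idx`) only makes the recursion structural, it never cuts it short
def pvConsume (se : List (String × Int × Int)) (tick prev_tick : Int) :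
    Nat → Nat → PySem.Set Int → PySem.Set Int → Nat × PySem.Set Int × PySem.Set Int
  | 0, idx, active, onsets => (idx, active, onsets)
  | fuel+1, idx, active, onsets =>
    match se[idx]? with
    | none => (idx, active, onsets)
    | some e =>
      if e.2.1 ≤ tick then
        if e.1 == "on" then
          pvConsume se tick prev_tick fuel (idx+1) (PySem.Set.add active e.2.2)
            (if e.2.1 > prev_tick then PySem.Set.add onsets e.2.2 else onsets)
        else if e.1 == "off" then
          pvConsume se tick prev_tick fuel (idx+1) (PySem.Set.discard active e.2.2)
            (PySem.Set.discard onsets e.2.2)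
        else pvConsume se tick prev_tick fuel (idx+1) active onsets
      else (idx, active, onsets)

-- the body of A's `for grid_pos in range(grid_size)` loop;
-- state = (results, event_idx, prev_tick, last_melody, active_notes)
def pvAStep (se : List (String × Int × Int)) (t16 : Int) (method : String)
    (st : List Int × Nat × Int × Int × PySem.Set Int) (g : Int) :
    List Int × Nat × Int × Int × PySem.Set Int :=
  let tick := g * t16
  let r := pvConsume se tick st.2.2.1 (se.length - st.2.1) st.2.1 st.2.2.2.2 PySem.Set.empty
  if method == "newest" then
    if !r.2.2.isEmpty then
      -- max(new_onsets): guarded by nonemptiness, the default is never read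
      let m := (PySem.List.max? r.2.2 (fun x => x)).getD 0
      (PySem.List.pySetD st.1 g m, r.1, tick, m, r.2.1)
    else if PySem.Set.contains r.2.1 st.2.2.2.1 then
      (PySem.List.pySetD st.1 g st.2.2.2.1, r.1, tick, st.2.2.2.1, r.2.1)
    else if !r.2.1.isEmpty then
      let m := (PySem.List.max? r.2.1 (fun x => x)).getD 0
      (PySem.List.pySetD st.1 g m, r.1, tick, m, r.2.1)
    else (st.1, r.1, tick, st.2.2.2.1, r.2.1)
  else
    if !r.2.1.isEmpty then
      (PySem.List.pySetD st.1 g ((PySem.List.max? r.2.1 (fun x => x)).getD 0), r.1, tick, st.2.2.2.1, r.2.1)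
    else (st.1, r.1, tick, st.2.2.2.1, r.2.1)

def extract_melody (ppqn : Int) (events : List (String × Int × Int)) (grid_size : Int) (method : String) : List Int :=
  let ticks_per_16th := PySem.Int.floordiv ppqn 4
  let se := PySem.List.sorted2 events (fun e => e.2.1) (fun e => if e.1 == "off" then (0:Int) else 1)
  let fd := se.foldl (fun (st : PySem.Dict Int Int × PySem.Dict Int Int) e =>
      if e.1 == "on" && !(st.1.contains e.2.2) then (st.1.insert e.2.2 e.2.1, st.2)
      else if e.1 == "off" && !(st.2.contains e.2.2) then (st.1, st.2.insert e.2.2 e.2.1)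
      else st) (PySem.Dict.empty, PySem.Dict.empty)
  let pre := fd.2.items.foldl (fun s p =>
      if !(fd.1.contains p.1) || decide ((fd.1.get? p.1).getD 0 > p.2) then PySem.Set.add s p.1 else s)
    PySem.Set.empty
  ((PySem.List.pyRange 0 grid_size 1).foldl (pvAStep se ticks_per_16th method)
    (List.replicate grid_size.toNat 0, 0, -1, 0, pre)).1

-- ===== PORT B =====
-- pass 1 body: state = (table, i, prev_tick, active)
def pvBPass1Step (se : List (String × Int × Int)) (t16 : Int)
    (st : List (PySem.Set Int × PySem.Set Int) × Nat × Int × PySem.Set Int) (g : Int) :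
    List (PySem.Set Int × PySem.Set Int) × Nat × Int × PySem.Set Int :=
  let tick := g * t16
  let r := pvConsume se tick st.2.2.1 (se.length - st.2.1) st.2.1 st.2.2.2 PySem.Set.empty
  (st.1 ++ [(r.2.1, r.2.2)], r.1, tick, r.2.1)

-- pass 2 body: state = (last_melody, results)
def pvBPass2Step (method : String) (st : Int × List Int) (row : PySem.Set Int × PySem.Set Int) :
    Int × List Int :=
  if method == "newest" then
    if !row.2.isEmpty then
      let m := (PySem.List.max? row.2 (fun x => x)).getD 0
      (m, st.2 ++ [m])
    else if PySem.Set.contains row.1 st.1 then (st.1, st.2 ++ [st.1])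
    else if !row.1.isEmpty then
      let m := (PySem.List.max? row.1 (fun x => x)).getD 0
      (m, st.2 ++ [m])
    else (st.1, st.2 ++ [0])
  else
    (st.1, st.2 ++ [if !row.1.isEmpty then (PySem.List.max? row.1 (fun x => x)).getD 0 else 0])

def extract_melody_alt (ppqn : Int) (events : List (String × Int × Int)) (grid_size : Int) (method : String) : List Int :=
  let ticks_per_16th := PySem.Int.floordiv ppqn 4
  let se := PySem.List.sorted2 events (fun e => e.2.1) (fun e => if e.1 == "off" then (0:Int) else 1)
  let active0 := events.foldl (fun s e =>
      if e.1 == "off" && !(events.any (fun f => f.1 == "on" && f.2.2 == e.2.2 && decide (f.2.1 ≤ e.2.1)))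
      then PySem.Set.add s e.2.2 else s) PySem.Set.empty
  let p1 := (PySem.List.pyRange 0 grid_size 1).foldl (pvBPass1Step se ticks_per_16th)
    ([], 0, -1, active0)
  (p1.1.foldl (pvBPass2Step method) (0, [])).2

-- ===== PRECONDITION & SPEC =====
def Spec_extract_melody (ppqn : Int) (events : List (String × Int × Int)) (grid_size : Int) (method : String) (out : List Int) : Prop := out = extract_melody_alt ppqn events grid_size method
instance (ppqn : Int) (events : List (String × Int × Int)) (grid_size : Int) (method : String) (out : List Int) : Decidable (Spec_extract_melody ppqn events grid_size method out) := by unfold Spec_extract_melody; infer_instance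

-- ===== CLAIM (what is proved, stated in full; the proofs are below) =====
def Claim_equal_extract_melody : Prop := ∀ (ppqn : Int) (events : List (String × Int × Int)) (grid_size : Int) (method : String), Dom_extract_melody ppqn events grid_size method → Spec_extract_melody ppqn events grid_size method (extract_melody ppqn events grid_size method)

-- ===== LEMMAS AND PROOFS =====

-- same members, regardless of insertion order
def pvSameMem (s t : PySem.Set Int) : Prop := ∀ x : Int, x ∈ s ↔ x ∈ t

theorem pvSameMem_add (s t : PySem.Set Int) (h : pvSameMem s t) (x : Int) :
    pvSameMem (PySem.Set.add s x) (PySem.Set.add t x) := by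
  intro y; simp [PySem.Set.mem_add, h y]

theorem pvSameMem_discard (s t : PySem.Set Int) (h : pvSameMem s t) (x : Int) :
    pvSameMem (PySem.Set.discard s x) (PySem.Set.discard t x) := by
  intro y; simp [PySem.Set.mem_discard, h y]

theorem pvSameMem_isEmpty (s t : PySem.Set Int) (h : pvSameMem s t) : s.isEmpty = t.isEmpty := by
  rw [Bool.eq_iff_iff, List.isEmpty_iff, List.isEmpty_iff,
    List.eq_nil_iff_forall_not_mem, List.eq_nil_iff_forall_not_mem]
  constructor <;> intro hs x hx
  · exact hs x ((h x).mpr hx)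
  · exact hs x ((h x).mp hx)

theorem pvSameMem_maxD (s t : PySem.Set Int) (h : pvSameMem s t) :
    (PySem.List.max? s (fun x => x)).getD 0 = (PySem.List.max? t (fun x => x)).getD 0 := by
  rcases hs : PySem.List.max? s (fun x => x) with _ | m
  · have hse : s = [] := (PySem.List.max?_eq_none_iff _ _).mp hs
    have hte : t = [] := by
      rw [List.eq_nil_iff_forall_not_mem]; intro x hx
      exact absurd ((h x).mpr hx) (by simp [hse])
    rw [hte, (PySem.List.max?_eq_none_iff ([] : List Int) (fun x => x)).mpr rfl]
  · have hm : m ∈ t := (h m).mp (PySem.List.max?_mem hs)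
    rcases ht : PySem.List.max? t (fun x => x) with _ | m'
    · rw [(PySem.List.max?_eq_none_iff _ _).mp ht] at hm; simp at hm
    · have h1 : m ≤ m' := PySem.List.max?_isMax ht m hm
      have h2 : m' ≤ m := PySem.List.max?_isMax hs m' ((h m').mpr (PySem.List.max?_mem ht))
      simp [le_antisymm h1 h2]

theorem pvSameMem_contains (s t : PySem.Set Int) (h : pvSameMem s t) (x : Int) :
    PySem.Set.contains s x = PySem.Set.contains t x := by
  rw [Bool.eq_iff_iff, PySem.Set.contains_iff, PySem.Set.contains_iff]; exact h x

-- the consumption loop advances the index and the onset set identically and keeps actives set-equal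
theorem pvWhile_rel (se : List (String × Int × Int)) (tick prev : Int) :
    ∀ fuel idx a1 a2 o, pvSameMem a1 a2 →
      (pvConsume se tick prev fuel idx a1 o).1 = (pvConsume se tick prev fuel idx a2 o).1 ∧
      pvSameMem (pvConsume se tick prev fuel idx a1 o).2.1 (pvConsume se tick prev fuel idx a2 o).2.1 ∧
      (pvConsume se tick prev fuel idx a1 o).2.2 = (pvConsume se tick prev fuel idx a2 o).2.2 := by
  intro fuel
  induction fuel with
  | zero => intro idx a1 a2 o h; exact ⟨rfl, h, rfl⟩
  | succ n ih =>
    intro idx a1 a2 o h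
    simp only [pvConsume, pvConsume]
    cases hse : se[idx]? with
    | none => exact ⟨rfl, h, rfl⟩
    | some e =>
      simp only [hse]
      split
      · split
        · exact ih _ _ _ _ (pvSameMem_add _ _ h _)
        · split
          · exact ih _ _ _ _ (pvSameMem_discard _ _ h _)
          · exact ih _ _ _ _ h
      · exact ⟨rfl, h, rfl⟩

-- writing result g into the zero padding = appending it to the finished prefix
theorem pvSet_pad (out : List Int) (m : Nat) (v : Int) (k : Int) (hk : 0 ≤ k)
    (hl : out.length = k.toNat) :
    PySem.List.pySetD (out ++ List.replicate (m + 1) (0 : Int)) k v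
      = (out ++ [v]) ++ List.replicate m 0 := by
  rw [PySem.List.pySetD_of_nonneg _ v hk, ← hl, List.replicate_succ]
  simp

-- the table accumulator of pass 1 is just collected at the end
theorem pvB1_acc (se : List (String × Int × Int)) (t16 : Int) :
    ∀ (gs : List Int) tbl idx prev act,
      gs.foldl (pvBPass1Step se t16) (tbl, idx, prev, act)
        = (tbl ++ (gs.foldl (pvBPass1Step se t16) ([], idx, prev, act)).1,
           (gs.foldl (pvBPass1Step se t16) ([], idx, prev, act)).2) := by
  intro gs
  induction gs with
  | nil => intro tbl idx prev act; simp
  | cons g gs ih =>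
    intro tbl idx prev act
    simp only [List.foldl_cons, pvBPass1Step]
    rw [ih (tbl ++ _), ih ([] ++ _)]
    simp

-- the fused grid loop of A against pass 1 + pass 2 of B, from any aligned mid-loop state
theorem pvMain (se : List (String × Int × Int)) (t16 : Int) (method : String) (n : Int) :
    ∀ (m : Nat) (k : Int), (n - k).toNat = m → 0 ≤ k →
    ∀ (out : List Int) (idx : Nat) (prev last : Int) (a1 a2 : PySem.Set Int),
      pvSameMem a1 a2 → out.length = k.toNat →
      ((PySem.List.pyRange k n 1).foldl (pvAStep se t16 method)
          (out ++ List.replicate m 0, idx, prev, last, a1)).1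
        = (((PySem.List.pyRange k n 1).foldl (pvBPass1Step se t16) ([], idx, prev, a2)).1.foldl
            (pvBPass2Step method) (last, out)).2 := by
  intro m
  induction m with
  | zero =>
    intro k hm hk out idx prev last a1 a2 hmem hl
    rw [PySem.List.pyRange_one_eq_nil (by omega)]
    simp
  | succ m ih =>
    intro k hm hk out idx prev last a1 a2 hmem hl
    rw [PySem.List.pyRange_one_cons (by omega)]
    simp only [List.foldl_cons]
    obtain ⟨hidx, hact, hons⟩ :=
      pvWhile_rel se (k * t16) prev (se.length - idx) idx a1 a2 PySem.Set.empty hmem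
    simp only [pvAStep, pvBPass1Step]
    rw [pvB1_acc se t16 _ ([] ++ _)]
    simp only [List.nil_append, List.foldl_append, List.foldl_cons]
    set r1 := pvConsume se (k * t16) prev (se.length - idx) idx a1 PySem.Set.empty with hr1
    set r2 := pvConsume se (k * t16) prev (se.length - idx) idx a2 PySem.Set.empty with hr2
    have hemons : r1.2.2.isEmpty = r2.2.2.isEmpty := by rw [hons]
    have hemact : r1.2.1.isEmpty = r2.2.1.isEmpty := pvSameMem_isEmpty _ _ hact
    have hmaxons : (PySem.List.max? r1.2.2 (fun x => x)).getD 0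
        = (PySem.List.max? r2.2.2 (fun x => x)).getD 0 := by rw [hons]
    have hmaxact : (PySem.List.max? r1.2.1 (fun x => x)).getD 0
        = (PySem.List.max? r2.2.1 (fun x => x)).getD 0 := pvSameMem_maxD _ _ hact
    have hcont : PySem.Set.contains r1.2.1 last = PySem.Set.contains r2.2.1 last :=
      pvSameMem_contains _ _ hact last
    simp only [pvBPass2Step]
    have hpad : out ++ List.replicate (m + 1) (0:Int) = (out ++ [0]) ++ List.replicate m 0 := by
      rw [List.replicate_succ]; simp
    by_cases hmeth : (method == "newest") = true
    · simp only [hmeth, if_true]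
      cases h1 : r1.2.2.isEmpty with
      | false =>
        have h1' : r2.2.2.isEmpty = false := hemons ▸ h1
        simp only [h1', Bool.not_false, if_true]
        rw [pvSet_pad out m _ k hk hl, hidx, hmaxons]
        exact ih (k + 1) (by omega) (by omega) _ _ _ _ _ _ hact (by simp [hl]; omega)
      | true =>
        have h1' : r2.2.2.isEmpty = true := hemons ▸ h1
        simp only [h1', Bool.not_true, Bool.false_eq_true, if_false]
        cases h2 : r1.2.1.contains last with
        | true =>
          have h2' : r2.2.1.contains last = true := hcont ▸ h2
          simp only [h2', if_true]
          rw [pvSet_pad out m last k hk hl, hidx]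
          exact ih (k + 1) (by omega) (by omega) _ _ _ _ _ _ hact (by simp [hl]; omega)
        | false =>
          have h2' : r2.2.1.contains last = false := hcont ▸ h2
          simp only [h2', Bool.false_eq_true, if_false]
          cases h3 : r1.2.1.isEmpty with
          | false =>
            have h3' : r2.2.1.isEmpty = false := hemact ▸ h3
            simp only [h3', Bool.not_false, if_true]
            rw [pvSet_pad out m _ k hk hl, hidx, hmaxact]
            exact ih (k + 1) (by omega) (by omega) _ _ _ _ _ _ hact (by simp [hl]; omega)
          | true =>
            have h3' : r2.2.1.isEmpty = true := hemact ▸ h3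
            simp only [h3', Bool.not_true, Bool.false_eq_true, if_false]
            rw [hpad, hidx]
            exact ih (k + 1) (by omega) (by omega) _ _ _ _ _ _ hact (by simp [hl]; omega)
    · simp only [hmeth, Bool.false_eq_true, if_false]
      cases h3 : r1.2.1.isEmpty with
      | false =>
        have h3' : r2.2.1.isEmpty = false := hemact ▸ h3
        simp only [h3', Bool.not_false, if_true]
        rw [pvSet_pad out m _ k hk hl, hidx, hmaxact]
        exact ih (k + 1) (by omega) (by omega) _ _ _ _ _ _ hact (by simp [hl]; omega)
      | true =>
        have h3' : r2.2.1.isEmpty = true := hemact ▸ h3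
        simp only [h3', Bool.not_true, Bool.false_eq_true, if_false]
        rw [hpad, hidx]
        exact ih (k + 1) (by omega) (by omega) _ _ _ _ _ _ hact (by simp [hl]; omega)

-- ---- the sort order of A/B's shared `sorted(events, key=...)` ----
-- the strict lexicographic 'comes strictly before' test used by the insertion sort
def pvBefore (a b : String × Int × Int) : Bool :=
  decide (a.2.1 < b.2.1) || (!decide (b.2.1 < a.2.1) &&
    decide ((if a.1 == "off" then (0:Int) else 1) < (if b.1 == "off" then (0:Int) else 1)))

theorem pvBefore_asymm {a b : String × Int × Int} (h : pvBefore a b = true) :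
    pvBefore b a = false := by
  simp only [pvBefore] at *
  generalize (if a.1 == "off" then (0:Int) else 1) = u at *
  generalize (if b.1 == "off" then (0:Int) else 1) = v at *
  simp at h ⊢
  omega

theorem pvBefore_trans {a b c : String × Int × Int} (h1 : pvBefore a b = true)
    (h2 : pvBefore b c = true) : pvBefore a c = true := by
  simp only [pvBefore] at *
  generalize (if a.1 == "off" then (0:Int) else 1) = u at *
  generalize (if b.1 == "off" then (0:Int) else 1) = v at *
  generalize (if c.1 == "off" then (0:Int) else 1) = w at *
  simp at h1 h2 ⊢
  omega

theorem pvInsertBy_pairwise (x : String × Int × Int) :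
    ∀ (ys : List (String × Int × Int)), ys.Pairwise (fun a b => pvBefore b a = false) →
      (PySem.List.insertBy pvBefore x ys).Pairwise (fun a b => pvBefore b a = false) := by
  intro ys
  induction ys with
  | nil =>
    intro _
    simp [PySem.List.insertBy]
  | cons y ys ih =>
    intro h
    rw [List.pairwise_cons] at h
    show (if pvBefore x y = true then x :: y :: ys else y :: PySem.List.insertBy pvBefore x ys).Pairwise _
    by_cases hb : pvBefore x y = true
    · rw [if_pos hb]
      refine List.Pairwise.cons ?_ (List.pairwise_cons.mpr h)
      intro z hz
      rcases List.mem_cons.mp hz with rfl | hz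
      · exact pvBefore_asymm hb
      · by_contra hzx
        rw [Bool.not_eq_false] at hzx
        exact absurd (pvBefore_trans hzx hb) (by rw [h.1 z hz]; simp)
    · rw [if_neg hb]
      refine List.Pairwise.cons ?_ (ih h.2)
      intro z hz
      rcases (PySem.List.mem_insertBy _ _ _ _).mp hz with rfl | hz
      · exact Bool.not_eq_true _ ▸ hb
      · exact h.1 z hz

theorem pvSe_pairwise (events : List (String × Int × Int)) :
    (PySem.List.sorted2 events (fun e => e.2.1)
        (fun e => if e.1 == "off" then (0:Int) else 1)).Pairwise
      (fun a b => a.2.1 ≤ b.2.1) := by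
  have hrw : PySem.List.sorted2 events (fun e => e.2.1)
      (fun e => if e.1 == "off" then (0:Int) else 1)
      = events.foldl (fun acc x => PySem.List.insertBy pvBefore x acc) [] := rfl
  rw [hrw]
  have main : ∀ (l : List (String × Int × Int)) (acc : List (String × Int × Int)),
      acc.Pairwise (fun a b => pvBefore b a = false) →
      (l.foldl (fun acc x => PySem.List.insertBy pvBefore x acc) acc).Pairwise
        (fun a b => pvBefore b a = false) := by
    intro l
    induction l with
    | nil => intro acc h; exact h
    | cons x l ih => intro acc h; exact ih _ (pvInsertBy_pairwise x acc h)
  refine (main events [] (by simp)).imp ?_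
  intro a b hab
  simp only [pvBefore, Bool.or_eq_false_iff, decide_eq_false_iff_not] at hab
  omega

-- in a list sorted by ticks, the first match of any predicate has the minimal tick among matches
theorem pvFind?_min (p : String × Int × Int → Bool) :
    ∀ (l : List (String × Int × Int)), l.Pairwise (fun a b => a.2.1 ≤ b.2.1) →
      ∀ e, l.find? p = some e → ∀ f ∈ l, p f = true → e.2.1 ≤ f.2.1 := by
  intro l
  induction l with
  | nil => intro _ e he; simp at he
  | cons a l ih =>
    intro h e he f hf hpf
    rw [List.pairwise_cons] at h
    rw [List.find?_cons] at he
    rcases List.mem_cons.mp hf with rfl | hf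
    · cases hpa : p f with
      | true => rw [hpa] at he; cases he; exact le_refl _
      | false => rw [hpa] at hpf; cases hpf
    · cases hpa : p a with
      | true => rw [hpa] at he; cases he; exact h.1 f hf
      | false => rw [hpa] at he; exact ih h.2 e he f hf hpf

-- ---- membership in an `if cond: s.add(key(a))` accumulation loop ----
theorem pvMem_addif_step {α : Type} (key : α → Int) (c : α → Bool) (s : PySem.Set Int)
    (a : α) (x : Int) :
    (x ∈ if c a then PySem.Set.add s (key a) else s) ↔ x ∈ s ∨ (c a = true ∧ key a = x) := by
  cases hc : c a with
  | true => simp [PySem.Set.mem_add, eq_comm]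
  | false => simp

theorem pvMem_foldl_addif {α : Type} (key : α → Int) (c : α → Bool) :
    ∀ (l : List α) (s0 : PySem.Set Int) (x : Int),
      (x ∈ l.foldl (fun s a => if c a then PySem.Set.add s (key a) else s) s0) ↔
        x ∈ s0 ∨ ∃ a ∈ l, c a = true ∧ key a = x := by
  intro l
  induction l with
  | nil => intro s0 x; simp
  | cons a l ih =>
    intro s0 x
    simp only [List.foldl_cons]
    rw [ih, pvMem_addif_step]
    constructor
    · rintro ((hx | ⟨hca, hk⟩) | ⟨b, hb, hcb, hk⟩)
      · exact Or.inl hx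
      · exact Or.inr ⟨a, List.mem_cons_self, hca, hk⟩
      · exact Or.inr ⟨b, List.mem_cons_of_mem a hb, hcb, hk⟩
    · rintro (hx | ⟨b, hb, hcb, hk⟩)
      · exact Or.inl (Or.inl hx)
      · rcases List.mem_cons.mp hb with rfl | hb
        · exact Or.inl (Or.inr ⟨hcb, hk⟩)
        · exact Or.inr ⟨b, hb, hcb, hk⟩

-- ---- A's first-event dictionaries ----
-- one component of A's combined first_on/first_off loop
def pvFirstStep (K : String) (d : PySem.Dict Int Int) (e : String × Int × Int) :
    PySem.Dict Int Int :=
  if e.1 == K && !(d.contains e.2.2) then d.insert e.2.2 e.2.1 else d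

-- A's single pass over two independent dict accumulators is two passes
theorem pvFd_split :
    ∀ (l : List (String × Int × Int)) (d1 d2 : PySem.Dict Int Int),
      l.foldl (fun (st : PySem.Dict Int Int × PySem.Dict Int Int) e =>
          if e.1 == "on" && !(st.1.contains e.2.2) then (st.1.insert e.2.2 e.2.1, st.2)
          else if e.1 == "off" && !(st.2.contains e.2.2) then (st.1, st.2.insert e.2.2 e.2.1)
          else st) (d1, d2)
        = (l.foldl (pvFirstStep "on") d1, l.foldl (pvFirstStep "off") d2) := by
  intro l
  induction l with
  | nil => intro d1 d2; rfl
  | cons e l ih =>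
    intro d1 d2
    simp only [List.foldl_cons]
    have hstep : (if e.1 == "on" && !(d1.contains e.2.2) then (d1.insert e.2.2 e.2.1, d2)
        else if e.1 == "off" && !(d2.contains e.2.2) then (d1, d2.insert e.2.2 e.2.1)
        else (d1, d2))
        = (pvFirstStep "on" d1 e, pvFirstStep "off" d2 e) := by
      simp only [pvFirstStep]
      by_cases hon : (e.1 == "on") = true
      · have hoff : (e.1 == "off") = false := by rw [eq_of_beq hon]; decide
        by_cases hc : d1.contains e.2.2 <;> simp [hon, hoff, hc]
      · simp only [Bool.not_eq_true] at hon
        by_cases hoff : (e.1 == "off") = true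
        · by_cases hc : d2.contains e.2.2 <;> simp [hon, hoff, hc]
        · simp only [Bool.not_eq_true] at hoff
          simp [hon, hoff]
    rw [hstep, ih]

-- the keep-first insertion loop looked up = the first matching event
theorem pvFirst_get? (K : String) :
    ∀ (l : List (String × Int × Int)) (d : PySem.Dict Int Int) (x : Int),
      (l.foldl (pvFirstStep K) d).get? x
        = (d.get? x).or ((l.find? (fun e => e.1 == K && e.2.2 == x)).map (fun e => e.2.1)) := by
  intro l
  induction l with
  | nil => intro d x; simp
  | cons e l ih =>
    intro d x
    simp only [List.foldl_cons, List.find?_cons]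
    by_cases hp : (e.1 == K && e.2.2 == x) = true
    · rw [hp]
      obtain ⟨hK, hx⟩ := Bool.and_eq_true_iff.mp hp
      have hx' : e.2.2 = x := eq_of_beq hx
      simp only [pvFirstStep, hK, Bool.true_and]
      cases hcont : d.contains e.2.2 with
      | true =>
        simp only [Bool.not_true, Bool.false_eq_true, if_false, ih]
        rw [PySem.Dict.contains_eq_isSome_get?] at hcont
        rcases hget : d.get? e.2.2 with _ | v
        · rw [hget] at hcont; cases hcont
        · rw [hx'] at hget; rw [hget]; rfl
      | false =>
        simp only [Bool.not_false, if_true, ih]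
        have hget : d.get? e.2.2 = none := by
          rw [PySem.Dict.contains_eq_isSome_get?] at hcont
          rcases hget : d.get? e.2.2 with _ | v
          · rfl
          · rw [hget] at hcont; cases hcont
        have : (d.insert e.2.2 e.2.1).get? x = some e.2.1 := by
          rw [← hx']; exact PySem.Dict.get?_insert_self d e.2.2 e.2.1
        rw [this, ← hx', hget]
        rfl
    · rw [Bool.not_eq_true] at hp
      rw [hp]
      have hstep : (pvFirstStep K d e).get? x = d.get? x := by
        simp only [pvFirstStep]
        split
        · rename_i hcond
          obtain ⟨hK, hcont⟩ := Bool.and_eq_true_iff.mp hcond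
          have hne : x ≠ e.2.2 := by
            intro hxe
            have : (e.1 == K && e.2.2 == x) = true := by
              rw [hK, Bool.true_and, hxe]; exact beq_self_eq_true _
            rw [this] at hp; cases hp
          exact PySem.Dict.get?_insert_of_ne _ _ hne
        · rfl
      rw [ih, hstep]

theorem pvFirst_nodup (K : String) :
    ∀ (l : List (String × Int × Int)) (d : PySem.Dict Int Int),
      d.keys.Nodup → (l.foldl (pvFirstStep K) d).keys.Nodup := by
  intro l
  induction l with
  | nil => intro d h; exact h
  | cons e l ih =>
    intro d h
    simp only [List.foldl_cons]
    refine ih _ ?_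
    simp only [pvFirstStep]
    split
    · exact PySem.Dict.nodup_keys_insert _ _ _ h
    · exact h

-- ---- A's pre-existing set and B's pre-existing set have the same members ----
theorem pvPre_sameMem (events : List (String × Int × Int)) :
    pvSameMem
      (((PySem.List.sorted2 events (fun e => e.2.1)
            (fun e => if e.1 == "off" then (0:Int) else 1)).foldl
          (fun (st : PySem.Dict Int Int × PySem.Dict Int Int) e =>
            if e.1 == "on" && !(st.1.contains e.2.2) then (st.1.insert e.2.2 e.2.1, st.2)
            else if e.1 == "off" && !(st.2.contains e.2.2) then (st.1, st.2.insert e.2.2 e.2.1)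
            else st) (PySem.Dict.empty, PySem.Dict.empty)).2.items.foldl
        (fun s p =>
          if !(((PySem.List.sorted2 events (fun e => e.2.1)
                (fun e => if e.1 == "off" then (0:Int) else 1)).foldl
              (fun (st : PySem.Dict Int Int × PySem.Dict Int Int) e =>
                if e.1 == "on" && !(st.1.contains e.2.2) then (st.1.insert e.2.2 e.2.1, st.2)
                else if e.1 == "off" && !(st.2.contains e.2.2) then (st.1, st.2.insert e.2.2 e.2.1)
                else st) (PySem.Dict.empty, PySem.Dict.empty)).1.contains p.1)
              || decide ((((PySem.List.sorted2 events (fun e => e.2.1)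
                    (fun e => if e.1 == "off" then (0:Int) else 1)).foldl
                  (fun (st : PySem.Dict Int Int × PySem.Dict Int Int) e =>
                    if e.1 == "on" && !(st.1.contains e.2.2) then (st.1.insert e.2.2 e.2.1, st.2)
                    else if e.1 == "off" && !(st.2.contains e.2.2) then (st.1, st.2.insert e.2.2 e.2.1)
                    else st) (PySem.Dict.empty, PySem.Dict.empty)).1.get? p.1).getD 0 > p.2)
          then PySem.Set.add s p.1 else s) PySem.Set.empty)
      (events.foldl (fun s e =>
          if e.1 == "off" && !(events.any (fun f => f.1 == "on" && f.2.2 == e.2.2 && decide (f.2.1 ≤ e.2.1)))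
          then PySem.Set.add s e.2.2 else s) PySem.Set.empty) := by
  intro x
  rw [pvFd_split]
  set se := PySem.List.sorted2 events (fun e => e.2.1)
      (fun e => if e.1 == "off" then (0:Int) else 1) with hse
  set fon := se.foldl (pvFirstStep "on") PySem.Dict.empty with hfon
  set foff := se.foldl (pvFirstStep "off") PySem.Dict.empty with hfoff
  have hmemse : ∀ g, g ∈ se ↔ g ∈ events := fun g =>
    (PySem.List.sorted2_perm events _ _ false).mem_iff
  have hgon : ∀ y, fon.get? y = (se.find? (fun e => e.1 == "on" && e.2.2 == y)).map (fun e => e.2.1) := by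
    intro y; rw [hfon, pvFirst_get? "on" se PySem.Dict.empty y, PySem.Dict.get?_empty, Option.none_or]
  have hgoff : ∀ y, foff.get? y = (se.find? (fun e => e.1 == "off" && e.2.2 == y)).map (fun e => e.2.1) := by
    intro y; rw [hfoff, pvFirst_get? "off" se PySem.Dict.empty y, PySem.Dict.get?_empty, Option.none_or]
  have hnodup : foff.keys.Nodup := pvFirst_nodup "off" se _ PySem.Dict.nodup_keys_empty
  have hsorted : se.Pairwise (fun a b => a.2.1 ≤ b.2.1) := pvSe_pairwise events
  rw [pvMem_foldl_addif (fun p : Int × Int => p.1)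
      (fun p => !(fon.contains p.1) || decide ((fon.get? p.1).getD 0 > p.2)) foff.items PySem.Set.empty x,
    pvMem_foldl_addif (fun e : String × Int × Int => e.2.2)
      (fun e => e.1 == "off" && !(events.any (fun f => f.1 == "on" && f.2.2 == e.2.2 && decide (f.2.1 ≤ e.2.1))))
      events PySem.Set.empty x]
  simp only [PySem.Set.empty, List.not_mem_nil, false_or]
  constructor
  · rintro ⟨p, hpmem, hcp, hpx⟩
    have hget : foff.get? p.1 = some p.2 :=
      (PySem.Dict.get?_eq_some_iff_mem_items foff p.1 p.2 hnodup).mpr (by rwa [Prod.mk.eta])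
    rw [hgoff] at hget
    rcases hfind : se.find? (fun e => e.1 == "off" && e.2.2 == p.1) with _ | e0
    · rw [hfind] at hget; simp at hget
    · rw [hfind] at hget
      have he0tick : e0.2.1 = p.2 := by simpa using hget
      have he0se : e0 ∈ se := List.mem_of_find?_eq_some hfind
      have he0p := List.find?_some hfind
      simp only [Bool.and_eq_true_iff] at he0p
      obtain ⟨he0off, he0x⟩ := he0p
      refine ⟨e0, (hmemse e0).mp he0se, ?_, by rw [eq_of_beq he0x, hpx]⟩
      rw [Bool.and_eq_true_iff]
      refine ⟨he0off, ?_⟩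
      rw [Bool.not_eq_true']
      rw [List.any_eq_false]
      intro f hf hfp
      obtain ⟨hf1, hfle⟩ := Bool.and_eq_true_iff.mp hfp
      obtain ⟨hfon, hfx⟩ := Bool.and_eq_true_iff.mp hf1
      -- there is an 'on' event for this note at tick ≤ e0's tick: contradicts hcp
      have hfse : f ∈ se := (hmemse f).mpr hf
      have hfpred : (f.1 == "on" && f.2.2 == p.1) = true := by
        rw [Bool.and_eq_true]
        exact ⟨hfon, by rw [eq_of_beq hfx, eq_of_beq he0x]; exact beq_self_eq_true _⟩
      rcases hfindon : se.find? (fun e => e.1 == "on" && e.2.2 == p.1) with _ | g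
      · rw [List.find?_eq_none] at hfindon
        exact hfindon f hfse hfpred
      · have hgmin : g.2.1 ≤ f.2.1 := pvFind?_min _ se hsorted g hfindon f hfse hfpred
        have hgon' : fon.get? p.1 = some g.2.1 := by rw [hgon, hfindon]; rfl
        rcases Bool.or_eq_true_iff.mp hcp with hc1 | hc2
        · rw [Bool.not_eq_true'] at hc1
          rw [PySem.Dict.contains_eq_isSome_get?, hgon'] at hc1
          cases hc1
        · rw [decide_eq_true_eq, hgon'] at hc2
          simp only [Option.getD_some] at hc2
          -- hc2 : g.2.1 > p.2 ; but g.2.1 ≤ f.2.1 ≤ e0.2.1 = p.2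
          rw [decide_eq_true_eq] at hfle
          omega
  · rintro ⟨e, hemem, hce, hex⟩
    obtain ⟨heoff, hnoon⟩ := Bool.and_eq_true_iff.mp hce
    rw [Bool.not_eq_true'] at hnoon
    rw [List.any_eq_false] at hnoon
    have hese : e ∈ se := (hmemse e).mpr hemem
    have hepred : (e.1 == "off" && e.2.2 == x) = true := by
      rw [Bool.and_eq_true]
      exact ⟨heoff, by rw [hex]; exact beq_self_eq_true _⟩
    rcases hfind : se.find? (fun e => e.1 == "off" && e.2.2 == x) with _ | e0
    · rw [List.find?_eq_none] at hfind
      exact absurd hepred (hfind e hese)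
    · have he0min : e0.2.1 ≤ e.2.1 := pvFind?_min _ se hsorted e0 hfind e hese hepred
      have hget : foff.get? x = some e0.2.1 := by rw [hgoff, hfind]; rfl
      have hitems : (x, e0.2.1) ∈ foff.items :=
        (PySem.Dict.get?_eq_some_iff_mem_items foff x e0.2.1 hnodup).mp hget
      refine ⟨(x, e0.2.1), hitems, ?_, rfl⟩
      rw [Bool.or_eq_true_iff]
      cases hcont : fon.contains x with
      | false => exact Or.inl (by decide)
      | true =>
        refine Or.inr ?_
        rw [PySem.Dict.contains_eq_isSome_get?] at hcont
        rcases hfindon : se.find? (fun e => e.1 == "on" && e.2.2 == x) with _ | g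
        · rw [hgon x, hfindon] at hcont; simp at hcont
        · have hgx : fon.get? x = some g.2.1 := by rw [hgon, hfindon]; rfl
          have hgse : g ∈ se := List.mem_of_find?_eq_some hfindon
          have hgp := List.find?_some hfindon
          simp only [Bool.and_eq_true_iff] at hgp
          obtain ⟨hg1, hg2⟩ := hgp
          have hno := hnoon g ((hmemse g).mp hgse)
          rw [Bool.not_eq_true, Bool.and_eq_false_iff, Bool.and_eq_false_iff] at hno
          have hgt : g.2.1 > e.2.1 := by
            rcases hno with (hgg | hgg) | hgg
            · rw [hg1] at hgg; cases hgg
            · rw [hex] at hgg; rw [hg2] at hgg; cases hgg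
            · rw [decide_eq_false_iff_not] at hgg; omega
          rw [hgx]
          simp only [Option.getD_some, decide_eq_true_eq]
          omega

-- ===== VERDICT (by name: the statement is the Claim_ definition above) =====
theorem extract_melody_spec : Claim_equal_extract_melody := by
  intro ppqn events grid_size method _
  show extract_melody ppqn events grid_size method = extract_melody_alt ppqn events grid_size method
  exact pvMain
    (PySem.List.sorted2 events (fun e => e.2.1) (fun e => if e.1 == "off" then (0:Int) else 1))
    (PySem.Int.floordiv ppqn 4) method grid_size grid_size.toNat 0 (by omega) le_rfl
    [] 0 (-1) 0 _ _ (pvPre_sameMem events) rfl
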